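-- pv_equiv track=rewrite | github.com/tropical42/CSC-110 | Assignment 5/assign5a.py | compute_fussiest_eaters
-- ===== SOURCE A (Python) =====
-- def compute_fussiest_eaters(life):
--
-- 	dict_eaters = {}
--
-- 	for i in life:
-- 		dict_eaters[i] = len(life[i])
--
-- 	keys = []
-- 	values = []
--
-- 	for i in dict_eaters:
-- 		keys.append(i)
-- 		values.append(dict_eaters[i])
--
-- 	fussy_eaters = []
--
-- 	for i in keys:
-- 		if min(values) == dict_eaters[i]:
-- 			fussy_eaters.append(i)
--
-- 	return sorted(fussy_eaters)
-- ===== SOURCE B (Python) =====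
-- def compute_fussiest_eaters(life):
--     groups = {}
--     for eater, foods in life.items():
--         groups.setdefault(len(foods), []).append(eater)
--     m = min(groups, default=None)
--     return sorted(groups.get(m, []))
-- ===== Notes on version B (the rewrite author's own statement) =====
-- stated objective: faster
-- what changed: Instead of building a name->count dict, re-scanning it into parallel key/value lists and recomputing min(values) inside the filtering loop, B groups eaters into a count->names bucket dict in one pass and returns the sorted minimum-count bucket.
import Mathlib
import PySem

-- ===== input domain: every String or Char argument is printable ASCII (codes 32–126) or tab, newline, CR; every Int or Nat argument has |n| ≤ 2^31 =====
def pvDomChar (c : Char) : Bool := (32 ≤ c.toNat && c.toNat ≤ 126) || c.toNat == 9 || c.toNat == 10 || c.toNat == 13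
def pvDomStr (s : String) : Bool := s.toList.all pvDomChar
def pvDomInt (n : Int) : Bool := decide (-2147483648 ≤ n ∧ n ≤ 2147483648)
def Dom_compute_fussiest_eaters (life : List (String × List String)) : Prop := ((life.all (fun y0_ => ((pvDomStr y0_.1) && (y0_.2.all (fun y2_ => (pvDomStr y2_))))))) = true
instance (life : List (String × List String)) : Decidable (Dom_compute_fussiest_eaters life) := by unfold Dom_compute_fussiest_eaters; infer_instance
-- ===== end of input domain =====

-- B replaces A's name->count dict plus parallel key/value lists plus per-key min(values) rescan
-- by a single count->eaters grouping pass and the sorted minimum-count bucket (objective: faster).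


-- ===== PORT A =====
-- `life` is a Python dict: iterating it yields its key/value pairs in order, and under
-- Pre_ (distinct keys) `life[i]` is exactly the pair's own value `i.2`.
def compute_fussiest_eaters (life : List (String × List String)) : List String :=
  let dict_eaters : PySem.Dict String Int :=
    life.foldl (fun d i => d.insert i.1 (i.2.length : Int)) PySem.Dict.empty
  -- one loop appending to both `keys` and `values` (pair accumulator);
  -- dict_eaters[i] never raises: i ranges over dict_eaters' keys, so getD is exact
  let kv : List String × List Int :=
    dict_eaters.keys.foldl
      (fun s i => (s.1 ++ [i], s.2 ++ [dict_eaters.getD i 0])) ([], [])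
  let keys := kv.1
  let values := kv.2
  let fussy_eaters : List String :=
    keys.foldl
      (fun acc i =>
        if PySem.List.min? values (fun x => x) = some (dict_eaters.getD i 0) then acc ++ [i]
        else acc) []
  PySem.List.sorted fussy_eaters (fun x => x) false

-- ===== PORT B =====
def compute_fussiest_eaters_alt (life : List (String × List String)) : List String :=
  let groups : PySem.Dict Int (List String) :=
    life.foldl (fun g p => g.modify (p.2.length : Int) [] (fun l => l ++ [p.1])) PySem.Dict.empty
  -- m = min(groups, default=None); groups.get(None, []) = [] since all keys are ints
  match PySem.List.min? groups.keys (fun x => x) with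
  | none => PySem.List.sorted ([] : List String) (fun x => x) false
  | some m => PySem.List.sorted (groups.getD m []) (fun x => x) false

-- ===== PRECONDITION & SPEC =====
-- Pre_ restricts to genuine dict inputs: a Python dict cannot hold duplicate keys, so
-- association lists with a repeated key represent no input A ever receives.
def Pre_compute_fussiest_eaters (life : List (String × List String)) : Prop :=
  (life.map Prod.fst).Nodup
instance (life : List (String × List String)) : Decidable (Pre_compute_fussiest_eaters life) := by unfold Pre_compute_fussiest_eaters; infer_instance
def pvWitness_compute_fussiest_eaters : (List (String × List String)) :=
  [("ann", ["kale"]), ("bob", ["pie", "ham"]), ("cy", ["tea"])]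
def Spec_compute_fussiest_eaters (life : List (String × List String)) (out : List String) : Prop := out = compute_fussiest_eaters_alt life
instance (life : List (String × List String)) (out : List String) : Decidable (Spec_compute_fussiest_eaters life out) := by unfold Spec_compute_fussiest_eaters; infer_instance

-- ===== CLAIM (what is proved, stated in full; the proofs are below) =====
def Claim_equal_compute_fussiest_eaters : Prop := ∀ (life : List (String × List String)), Dom_compute_fussiest_eaters life → Pre_compute_fussiest_eaters life → Spec_compute_fussiest_eaters life (compute_fussiest_eaters life)

-- ===== LEMMAS AND PROOFS =====

-- min (no key) of a list and of its dedup-as-set agree: same members, Int's order is total.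
theorem min?_ofList_eq_min? (xs : List Int) :
    PySem.List.min? (PySem.Set.ofList xs) (fun x => x) = PySem.List.min? xs (fun x => x) := by
  rcases h : PySem.List.min? xs (fun x => x) with _ | m
  · rw [PySem.List.min?_eq_none_iff] at h
    subst h; rfl
  · rcases h2 : PySem.List.min? (PySem.Set.ofList xs) (fun x => x) with _ | m2
    · rw [PySem.List.min?_eq_none_iff] at h2
      have hm := PySem.List.min?_mem h
      have : m ∈ PySem.Set.ofList xs := by rw [PySem.Set.mem_ofList]; exact hm
      rw [h2] at this; simp at this
    · have hm := PySem.List.min?_mem h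
      have hm2 := PySem.List.min?_mem h2
      have hm2' : m2 ∈ xs := by rwa [PySem.Set.mem_ofList] at hm2
      have h1 := PySem.List.min?_isMin h m2 hm2'
      have h2' := PySem.List.min?_isMin h2 m (by rw [PySem.Set.mem_ofList]; exact hm)
      simp at h1 h2' ⊢
      omega

theorem compute_fussiest_eaters_eq (life : List (String × List String))
    (hpre : (life.map Prod.fst).Nodup) :
    compute_fussiest_eaters life = compute_fussiest_eaters_alt life := by
  unfold compute_fussiest_eaters compute_fussiest_eaters_alt
  dsimp only
  set D := life.foldl (fun d i => d.insert i.1 (i.2.length : Int)) PySem.Dict.empty with hD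
  have hitems : D.items = life.map (fun a => (a.1, (a.2.length : Int))) := by
    rw [hD, PySem.Dict.items_foldl_insert_fresh life Prod.fst (fun a => ((a.2.length : Nat) : Int))
        PySem.Dict.empty (fun a _ => PySem.Dict.contains_empty _) hpre]
    rfl
  have hkeys : D.keys = life.map Prod.fst := by
    show D.items.map Prod.fst = _
    rw [hitems, List.map_map]; rfl
  have hkeysnd : D.keys.Nodup := by rw [hkeys]; exact hpre
  have hgetD : ∀ a ∈ life, D.getD a.1 0 = (a.2.length : Int) := by
    intro a ha
    exact PySem.Dict.getD_of_mem_items D (by rw [hitems]; exact List.mem_map_of_mem ha) hkeysnd 0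
  -- split the pair fold into the two appending loops
  rw [PySem.List.foldl_prod_mk (f := fun acc i => acc ++ [i])
      (g := fun acc i => acc ++ [D.getD i 0])]
  simp only [PySem.List.foldl_append_singleton_eq_self,
    PySem.List.foldl_append_singleton_eq_map, List.nil_append]
  have hvals : D.keys.map (fun i => D.getD i 0) = life.map (fun a => (a.2.length : Int)) := by
    rw [hkeys, List.map_map]
    exact List.map_congr_left (fun a ha => hgetD a ha)
  rw [hvals]
  -- A's filtering loop is a List.filter
  have hfilter := PySem.List.foldl_append_if
      (p := fun i => decide (PySem.List.min? (life.map (fun a => (a.2.length : Int))) (fun x => x) = some (D.getD i 0)))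
      (f := fun i => i) D.keys []
  simp only [decide_eq_true_eq] at hfilter
  rw [hfilter]
  -- B's key set is the dedup of the length list
  rw [PySem.Dict.keys_foldl_modify_key life (fun p => ((p.2.length : Nat) : Int)) []
      (fun _ p l => l ++ [p.1]) PySem.Dict.empty]
  have hek : (PySem.Dict.empty : PySem.Dict Int (List String)).keys = [] := rfl
  rw [hek, PySem.Set.update_nil_left, min?_ofList_eq_min?]
  rcases hmin : PySem.List.min? (life.map (fun a => (a.2.length : Int))) (fun x => x) with _ | m
  · -- empty dict: both sides sort the empty list
    rw [hmin]
    dsimp only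
    rw [PySem.List.min?_eq_none_iff] at hmin
    have : life = [] := by simpa using hmin
    subst this; rfl
  · -- nonempty: B's minimum bucket is A's filtered key list
    rw [hmin]
    dsimp only
    rw [← List.foldl_map (f := fun (p : String × List String) => (((p.2.length : Nat) : Int), p.1))
        (g := fun (d : PySem.Dict Int (List String)) (p : Int × String) => d.modify p.1 [] (fun l => l ++ [p.2]))]
    rw [PySem.Dict.getD_foldl_modify_append]
    simp only [PySem.Dict.getD_empty, List.nil_append, List.filter_map, List.map_map]
    rw [hkeys, List.filter_map, List.map_map]
    have hfeq : List.filter ((fun i => decide (some m = some (D.getD i 0))) ∘ Prod.fst) life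
        = List.filter ((fun p => p.1 == m) ∘ fun p => (((p.2.length : Nat) : Int), p.1)) life := by
      apply List.filter_congr
      intro a ha
      simp only [Function.comp_apply, hgetD a ha, Option.some.injEq]
      rw [Bool.eq_iff_iff, beq_iff_eq, decide_eq_true_eq]
      exact eq_comm
    rw [hfeq]
    congr 1

-- ===== VERDICT (by name: the statement is the Claim_ definition above) =====
theorem compute_fussiest_eaters_spec : Claim_equal_compute_fussiest_eaters := by
  intro life _ hpre
  unfold Spec_compute_fussiest_eaters
  exact compute_fussiest_eaters_eq life hpre
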